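-- pv_equiv track=rewrite | github.com/JohnCrabs/CrabsPhotogrammetry | lib/global_functions.py | findMax_2x2
-- ===== SOURCE A (Python) =====
-- def findMax_2x2(mtrx):
--     x = 0
--     y = 0
--
--     for m in mtrx:
--         if x < m[0]:
--             x = m[0]
--         if y < m[1]:
--             y = m[1]
--     return x, y
-- ===== SOURCE B (Python) =====
-- def findMax_2x2(mtrx):
--     if not mtrx:
--         return 0, 0
--     if len(mtrx) == 1:
--         return max(0, mtrx[0][0]), max(0, mtrx[0][1])
--     k = len(mtrx) // 2
--     ax, ay = findMax_2x2(mtrx[:k])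
--     bx, by = findMax_2x2(mtrx[k:])
--     return max(ax, bx), max(ay, by)
-- ===== Notes on version B (the rewrite author's own statement) =====
-- stated objective: alternative
-- what changed: Replaces the fused running-max loop with a divide-and-conquer recursion: split the list in half, recursively take the 0-floored column maxima of each half, and combine them with max.
import Mathlib
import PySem

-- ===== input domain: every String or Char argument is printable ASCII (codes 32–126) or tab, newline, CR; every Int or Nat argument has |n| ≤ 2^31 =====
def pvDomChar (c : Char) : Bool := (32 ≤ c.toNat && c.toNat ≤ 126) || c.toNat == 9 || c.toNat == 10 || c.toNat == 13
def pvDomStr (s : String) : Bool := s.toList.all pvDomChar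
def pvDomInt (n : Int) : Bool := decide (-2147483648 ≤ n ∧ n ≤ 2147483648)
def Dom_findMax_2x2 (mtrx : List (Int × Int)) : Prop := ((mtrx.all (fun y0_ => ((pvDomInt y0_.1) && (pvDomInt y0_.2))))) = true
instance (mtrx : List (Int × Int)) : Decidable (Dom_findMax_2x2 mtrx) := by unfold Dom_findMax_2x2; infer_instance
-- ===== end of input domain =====

-- B replaces A's fused running-max loop with a divide-and-conquer recursion (split in half,
-- combine the halves' 0-floored column maxima with max); objective: alternative.

-- ===== PORT A =====
def findMax_2x2 (mtrx : List (Int × Int)) : Int × Int :=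
  mtrx.foldl (fun s m =>
    (if s.1 < m.1 then m.1 else s.1, if s.2 < m.2 then m.2 else s.2)) (0, 0)

-- ===== PORT B =====
def findMax_2x2_alt : List (Int × Int) → Int × Int
  | [] => (0, 0)
  | [p] => (max 0 p.1, max 0 p.2)
  | p :: q :: r =>
    let l := p :: q :: r
    let k := l.length / 2
    let a := findMax_2x2_alt (l.take k)
    let b := findMax_2x2_alt (l.drop k)
    (max a.1 b.1, max a.2 b.2)
termination_by l => l.length
decreasing_by
  · simp [List.length_take]; omega
  · simp [List.length_drop]; omega

-- ===== PRECONDITION & SPEC =====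
def Spec_findMax_2x2 (mtrx : List (Int × Int)) (out : Int × Int) : Prop := out = findMax_2x2_alt mtrx
instance (mtrx : List (Int × Int)) (out : Int × Int) : Decidable (Spec_findMax_2x2 mtrx out) := by unfold Spec_findMax_2x2; infer_instance

-- ===== CLAIM (what is proved, stated in full; the proofs are below) =====
def Claim_equal_findMax_2x2 : Prop := ∀ (mtrx : List (Int × Int)), Dom_findMax_2x2 mtrx → Spec_findMax_2x2 mtrx (findMax_2x2 mtrx)

-- ===== LEMMAS AND PROOFS =====

-- the common specification: the two 0-floored column maxima
def colMax (mtrx : List (Int × Int)) : Int × Int :=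
  ((mtrx.map Prod.fst).foldl max 0, (mtrx.map Prod.snd).foldl max 0)

theorem foldl_max_shift (l : List Int) (a b : Int) :
    l.foldl max (max a b) = max a (l.foldl max b) := by
  induction l generalizing b with
  | nil => rfl
  | cons h t ih => simp only [List.foldl_cons, max_assoc, ih]

theorem init_le_foldl_max (l : List Int) (a : Int) : a ≤ l.foldl max a := by
  induction l generalizing a with
  | nil => simp
  | cons h t ih => exact le_trans (le_max_left a h) (ih _)

theorem foldl_max_append (l1 l2 : List Int) :
    (l1 ++ l2).foldl max 0 = max (l1.foldl max 0) (l2.foldl max 0) := by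
  rw [List.foldl_append]
  have h0 : (0 : Int) ≤ l1.foldl max 0 := init_le_foldl_max l1 0
  have h := foldl_max_shift l2 (l1.foldl max 0) 0
  rw [max_eq_left h0] at h
  rw [h]

theorem colMax_append (l1 l2 : List (Int × Int)) :
    colMax (l1 ++ l2) = (max (colMax l1).1 (colMax l2).1, max (colMax l1).2 (colMax l2).2) := by
  simp only [colMax, List.map_append, foldl_max_append]

theorem a_eq_colMax (mtrx : List (Int × Int)) : findMax_2x2 mtrx = colMax mtrx := by
  unfold findMax_2x2 colMax
  have gen : ∀ (l : List (Int × Int)) (a b : Int),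
      l.foldl (fun s m =>
        ((if s.1 < m.1 then m.1 else s.1 : Int), (if s.2 < m.2 then m.2 else s.2 : Int))) (a, b)
      = ((l.map Prod.fst).foldl max a, (l.map Prod.snd).foldl max b) := by
    intro l
    induction l with
    | nil => intro a b; rfl
    | cons h t ih =>
      intro a b
      have hmax : ∀ u v : Int, (if u < v then v else u) = max u v := by
        intro u v; rw [max_def]; split_ifs <;> omega
      simp only [List.foldl_cons, List.map_cons]
      rw [ih, hmax, hmax]
  exact gen mtrx 0 0

theorem b_eq_colMax (mtrx : List (Int × Int)) : findMax_2x2_alt mtrx = colMax mtrx := by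
  induction mtrx using findMax_2x2_alt.induct with
  | case1 => rw [findMax_2x2_alt]; rfl
  | case2 p => rw [findMax_2x2_alt]; rfl
  | case3 p q r l k ih1 ih2 =>
    rw [findMax_2x2_alt]
    show (max (findMax_2x2_alt (l.take k)).1 (findMax_2x2_alt (l.drop k)).1,
          max (findMax_2x2_alt (l.take k)).2 (findMax_2x2_alt (l.drop k)).2) = colMax (p :: q :: r)
    rw [ih1, ih2]
    have h := colMax_append (l.take k) (l.drop k)
    rw [List.take_append_drop] at h
    rw [show (p :: q :: r) = l from rfl, h]

-- ===== VERDICT (by name: the statement is the Claim_ definition above) =====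
theorem findMax_2x2_spec : Claim_equal_findMax_2x2 := by
  intro mtrx _
  show _ = _
  rw [a_eq_colMax, b_eq_colMax]
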